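-- pv_equiv track=rewrite | github.com/Jjiggu/Programmers | 프로그래머스/1/17681. ［1차］ 비밀지도/［1차］ 비밀지도.py | solution
-- ===== SOURCE A (Python) =====
-- def solution(n, arr1, arr2):
--     answer = []
--     arr1_list = []
--     arr2_list = []
--     result = []
--     # 진수 변환 후 저장
--     for ar1, ar2 in zip(arr1, arr2):
--         arr1_binaryNum = format(ar1, 'b')
--         arr1_list.append(format(ar1, 'b').zfill(n))
--
--         arr2_binaryNum = format(ar2, 'b')
--         arr2_list.append(format(ar2, 'b').zfill(n))
--
--         # 2진수끼리 AND 연산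
--
--         and_result = format(int(arr1_binaryNum, 2) | int(arr2_binaryNum, 2), 'b')
--         result.append(and_result.zfill(n))
--
--     # 2개 겹친 배열에서 1이면 #, 0이면 " "
--     for binary in result:
--         wall = binary.replace("1", "#").replace("0", " ")
--         answer.append(wall)
--
--
--     return answer
-- ===== SOURCE B (Python) =====
-- def _row(v, n):
--     # peel the bits of v low-to-high into '#'/' ' cells, then left-pad to width n
--     cells = []
--     while v:
--         cells.append('#' if v & 1 else ' ')
--         v >>= 1
--     if not cells:
--         cells.append(' ')  # zero still occupies one (blank) cell
--     cells.reverse()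
--     return ' ' * (n - len(cells)) + ''.join(cells)
--
--
-- def solution(n, arr1, arr2):
--     return [_row(a | b, n) for a, b in zip(arr1, arr2)]
-- ===== Notes on version B (the rewrite author's own statement) =====
-- stated objective: alternative
-- what changed: A pipes each pair through format(..,'b'), an int(..,2) re-parse, OR, another format, zfill and two str.replace passes over two accumulator loops; B computes v = arr1[i] | arr2[i] once and builds each row arithmetically, peeling bits low-to-high with v & 1 / v >>= 1 into '#'/' ' cells, reversing and left-padding with blanks - no string formatting, parsing or replacement. Pre_ excludes zipped pairs with a negative entry, which lie outside the puzzle's 0..2^n-1 map-row domain: A renders a '-'-prefixed string there, while B's bit-peel loop does not terminate on a negative value.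
-- outside the precondition, e.g. on solution(1, [-1], [0]): A returns ['-#'], B does not finish within the time limit
import Mathlib
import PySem

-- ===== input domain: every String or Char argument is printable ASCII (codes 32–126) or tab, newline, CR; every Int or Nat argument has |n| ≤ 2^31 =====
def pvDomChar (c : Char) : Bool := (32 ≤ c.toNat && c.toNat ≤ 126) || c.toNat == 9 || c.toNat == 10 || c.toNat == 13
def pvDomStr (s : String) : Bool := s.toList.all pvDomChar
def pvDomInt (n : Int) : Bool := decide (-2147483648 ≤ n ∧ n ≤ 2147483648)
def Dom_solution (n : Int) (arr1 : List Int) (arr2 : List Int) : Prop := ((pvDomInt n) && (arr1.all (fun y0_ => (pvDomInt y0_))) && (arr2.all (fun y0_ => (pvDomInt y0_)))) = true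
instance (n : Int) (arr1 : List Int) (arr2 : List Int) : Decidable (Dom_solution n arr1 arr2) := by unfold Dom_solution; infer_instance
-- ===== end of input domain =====

-- B replaces A's format/int-parse/zfill/replace string pipeline by a direct arithmetic
-- bit peel per row (objective: alternative decomposition, same asymptotic cost).


-- ===== PORT A =====
-- int(s, 2), hand-ported: exact on the strings A ever passes to it, namely the output of
-- format(x, 'b') (an optional '-' followed by binary digits); PySem.Int.ofStrBase? covers
-- the same values but its digit core is private, so the proofs could not reach it.
def parseBin (cs : List Char) : Int :=
  match cs with
  | [] => 0
  | c :: r =>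
      if c = '-' then -(r.foldl (fun acc d => 2 * acc + (if d = '1' then 1 else 0)) 0)
      else (c :: r).foldl (fun acc d => 2 * acc + (if d = '1' then 1 else 0)) 0

-- one iteration of A's first loop, carrying (arr1_list, arr2_list, result)
def stepA (n : Int) (st : List String × List String × List String) (pr : Int × Int) :
    List String × List String × List String :=
  let arr1_binaryNum := PySem.Int.toBin pr.1
  let arr1_list := st.1 ++ [PySem.Str.zfill (PySem.Int.toBin pr.1) n]
  let arr2_binaryNum := PySem.Int.toBin pr.2
  let arr2_list := st.2.1 ++ [PySem.Str.zfill (PySem.Int.toBin pr.2) n]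
  let and_result := PySem.Int.toBin (Int.lor (parseBin arr1_binaryNum.toList) (parseBin arr2_binaryNum.toList))  -- Python's int `|`
  (arr1_list, arr2_list, st.2.2 ++ [PySem.Str.zfill and_result n])

-- binary.replace("1", "#").replace("0", " ")
def wallA (binary : String) : String :=
  PySem.Str.replace (PySem.Str.replace binary "1" "#") "0" " "

def solution (n : Int) (arr1 : List Int) (arr2 : List Int) : List String :=
  ((List.zip arr1 arr2).foldl (stepA n) ([], [], [])).2.2.foldl
    (fun answer binary => answer ++ [wallA binary]) []

-- ===== PORT B =====
-- the while loop of _row: peel bits of v low-to-high ('#' for 1, ' ' for 0).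
-- B's v is a Python int; under Pre_ (nonnegative entries) it is a natural number,
-- on which this recursion is exact (v >>= 1 is v / 2).
def rowCore (v : Nat) : List Char :=
  if v = 0 then [] else (if v &&& 1 ≠ 0 then '#' else ' ') :: rowCore (v / 2)
decreasing_by exact Nat.div_lt_self (Nat.pos_of_ne_zero (by assumption)) (by norm_num)

-- _row(v, n): bit cells, ' ' if none, reversed, left-padded with blanks to width n
-- ((n - len).toNat is exact: Python's ' ' * k is empty for k ≤ 0)
def rowB (v : Nat) (n : Int) : List Char :=
  let cells := rowCore v
  let cells := if cells = [] then cells ++ [' '] else cells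
  let cells := cells.reverse
  List.replicate (n - cells.length).toNat ' ' ++ cells

def solution_alt (n : Int) (arr1 : List Int) (arr2 : List Int) : List String :=
  -- v = a | b (Python's int `|` is Int.lor; nonnegative under Pre_, so .toNat is exact)
  (List.zip arr1 arr2).map (fun pr => String.ofList (rowB (Int.lor pr.1 pr.2).toNat n))

-- ===== PRECONDITION & SPEC =====
-- Pre_ keeps only nonnegative zipped entries — the puzzle's 0..2^n-1 map-row domain.
-- On a negative entry A still returns (a '-'-prefixed row), but B's natural bit-peel
-- loop does not terminate there, so those inputs are excluded.
def Pre_solution (n : Int) (arr1 : List Int) (arr2 : List Int) : Prop :=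
  ((List.zip arr1 arr2).all (fun pr => decide (0 ≤ pr.1) && decide (0 ≤ pr.2))) = true
instance (n : Int) (arr1 : List Int) (arr2 : List Int) : Decidable (Pre_solution n arr1 arr2) := by unfold Pre_solution; infer_instance

def pvWitness_solution : Int × List Int × List Int := (3, [0, 5], [0, 6])

def Spec_solution (n : Int) (arr1 : List Int) (arr2 : List Int) (out : List String) : Prop := out = solution_alt n arr1 arr2
instance (n : Int) (arr1 : List Int) (arr2 : List Int) (out : List String) : Decidable (Spec_solution n arr1 arr2 out) := by unfold Spec_solution; infer_instance

-- ===== CLAIM (what is proved, stated in full; the proofs are below) =====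
def Claim_equal_solution : Prop := ∀ (n : Int) (arr1 : List Int) (arr2 : List Int), Dom_solution n arr1 arr2 → Pre_solution n arr1 arr2 → Spec_solution n arr1 arr2 (solution n arr1 arr2)

-- ===== LEMMAS AND PROOFS =====

/-- `format(m, 'b')` for a natural `m`, structured along division by 2. -/
def binRep (m : Nat) : List Char :=
  if m ≤ 1 then [Nat.digitChar m] else binRep (m / 2) ++ [Nat.digitChar (m % 2)]
decreasing_by exact Nat.div_lt_self (by omega) (by norm_num)

theorem toDigitsCore_two (f : Nat) : ∀ (m : Nat) (acc : List Char), m < f →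
    Nat.toDigitsCore 2 f m acc = binRep m ++ acc := by
  induction f with
  | zero => intro m acc h; omega
  | succ f ih =>
    intro m acc h
    rw [Nat.toDigitsCore]
    by_cases h2 : m / 2 = 0
    · rw [if_pos h2, binRep]
      have hm1 : m ≤ 1 := by omega
      rw [if_pos hm1]
      have : m % 2 = m := Nat.mod_eq_of_lt (by omega)
      simp [this]
    · rw [if_neg h2, ih (m / 2) _ (by omega)]
      conv_rhs => rw [binRep]
      rw [if_neg (by omega)]
      simp

theorem toDigits_two (m : Nat) : Nat.toDigits 2 m = binRep m := by
  rw [Nat.toDigits, toDigitsCore_two (m + 1) m [] (by omega), List.append_nil]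

theorem binRep_mem (m : Nat) : ∀ c ∈ binRep m, c = '0' ∨ c = '1' := by
  induction m using Nat.strong_induction_on with
  | _ m ih =>
    intro c hc
    rw [binRep] at hc
    by_cases hm : m ≤ 1
    · rw [if_pos hm] at hc
      interval_cases m
      · left; simpa [Nat.digitChar] using hc
      · right; simpa [Nat.digitChar] using hc
    · rw [if_neg hm] at hc
      rcases List.mem_append.mp hc with h | h
      · exact ih (m / 2) (by omega) c h
      · have h2 := Nat.mod_two_eq_zero_or_one m
        rcases h2 with h2 | h2 <;> simp [h2, Nat.digitChar] at h <;> tauto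

theorem binRep_ne_nil (m : Nat) : binRep m ≠ [] := by
  rw [binRep]
  split <;> simp

/-- the character substitution performed by A's two `replace` calls -/
def repl (c : Char) : Char := if c = '1' then '#' else if c = '0' then ' ' else c

theorem replace_go_single (c d : Char) : ∀ (l : List Char) (fuel : Nat) (acc : List Char),
    l.length ≤ fuel →
    PySem.Chars.replace.go [c] [d] fuel l acc =
      acc.reverse ++ l.map (fun a => if a = c then d else a) := by
  intro l
  induction l with
  | nil =>
    intro fuel acc _
    cases fuel <;> simp [PySem.Chars.replace.go]
  | cons x t ih =>
    intro fuel acc hlen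
    cases fuel with
    | zero => simp at hlen
    | succ f =>
      rw [PySem.Chars.replace.go]
      by_cases hx : x = c
      · have hpre : List.isPrefixOf [c] (x :: t) = true := by
          simp [List.isPrefixOf, hx]
        rw [if_pos hpre, show List.drop [c].length (x :: t) = t from rfl]
        simp only [List.length_cons] at hlen
        rw [ih f _ (by omega)]
        simp [hx]
      · have hpre : List.isPrefixOf [c] (x :: t) = false := by
          simp [List.isPrefixOf]
          exact fun h => absurd h.symm hx
        rw [hpre]
        simp only [List.length_cons] at hlen
        rw [ih f _ (by omega)]
        simp [hx]

theorem replace_single (s : List Char) (c d : Char) :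
    PySem.Chars.replace s [c] [d] = s.map (fun a => if a = c then d else a) := by
  rw [PySem.Chars.replace]
  simp only [List.isEmpty_cons]
  rw [replace_go_single c d s s.length [] (le_refl _)]
  simp

theorem wall_eq_map (s : List Char) :
    PySem.Chars.replace (PySem.Chars.replace s ['1'] ['#']) ['0'] [' '] = s.map repl := by
  rw [replace_single, replace_single, List.map_map]
  apply List.map_congr_left
  intro a _
  simp only [Function.comp_apply, repl]
  by_cases h1 : a = '1' <;> by_cases h0 : a = '0' <;> simp [h1, h0]

/-- the cell list _row builds before reversing (with the `if not cells` patch) -/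
def cellsP (m : Nat) : List Char := if m = 0 then [' '] else rowCore m

theorem rowCore_nil_iff (m : Nat) : rowCore m = [] ↔ m = 0 := by
  rw [rowCore]
  split <;> simp_all

theorem map_repl_binRep (m : Nat) : (binRep m).map repl = (cellsP m).reverse := by
  induction m using Nat.strong_induction_on with
  | _ m ih =>
    rw [binRep]
    by_cases hm : m ≤ 1
    · rw [if_pos hm]
      interval_cases m <;> simp [cellsP, rowCore, repl, Nat.digitChar]
    · rw [if_neg hm]
      have h1 := ih (m / 2) (Nat.div_lt_self (by omega) (by norm_num))
      have h2 : cellsP (m / 2) = rowCore (m / 2) := by rw [cellsP, if_neg (by omega)]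
      have h3 : cellsP m = (if m &&& 1 ≠ 0 then '#' else ' ') :: rowCore (m / 2) := by
        rw [cellsP, if_neg (by omega), rowCore, if_neg (by omega)]
      rw [List.map_append, h1, h3, List.reverse_cons, h2]
      congr 1
      have h4 : m &&& 1 = m % 2 := Nat.and_one_is_mod m
      have h5 := Nat.mod_two_eq_zero_or_one m
      rcases h5 with h5 | h5 <;> simp [h4, h5, Nat.digitChar, repl]

theorem binRep_length_cells (m : Nat) : (binRep m).length = (cellsP m).length := by
  have := congrArg List.length (map_repl_binRep m)
  simpa using this

/-- chars of A's zfill-then-replace pipeline on a nonneg binary representation -/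
theorem zfill_wall (m : Nat) (w : Int) :
    (PySem.Chars.zfill (binRep m) w).map repl = rowB m w := by
  have hrow : rowB m w =
      List.replicate (w - (cellsP m).length).toNat ' ' ++ (cellsP m).reverse := by
    rw [rowB, cellsP]
    by_cases hm : m = 0
    · rw [if_pos hm]
      have h0 : rowCore 0 = [] := by rw [rowCore]; simp
      simp [hm, h0]
    · have h1 : rowCore m ≠ [] := by rw [Ne, rowCore_nil_iff]; exact hm
      simp [hm, h1]
  rw [hrow]
  have hL := binRep_length_cells m
  by_cases h : w ≤ (binRep m).length
  · rw [PySem.Chars.zfill.eq_def, if_pos h, map_repl_binRep]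
    have hz : (w - (cellsP m).length).toNat = 0 := by omega
    rw [hz]
    simp
  · rw [PySem.Chars.zfill.eq_def, if_neg h]
    push_neg at h
    obtain ⟨c, r, hcr⟩ := List.exists_cons_of_ne_nil (binRep_ne_nil m)
    have hc : c = '0' ∨ c = '1' := binRep_mem m c (by rw [hcr]; exact List.mem_cons_self)
    rw [hcr]
    have hsign : ¬(c = '+' ∨ c = '-') := by
      rcases hc with h | h <;> simp [h]
    simp only [hsign, if_false]
    rw [← hcr]
    rw [List.map_append, List.map_replicate, map_repl_binRep]
    have hrepl : repl '0' = ' ' := rfl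
    rw [hrepl]
    congr 2
    omega

/-- value of A's hand-rolled binary fold on `binRep` -/
theorem binRep_foldl (m : Nat) : ∀ (acc : Int),
    (binRep m).foldl (fun acc d => 2 * acc + (if d = '1' then 1 else 0)) acc =
      acc * 2 ^ (binRep m).length + m := by
  induction m using Nat.strong_induction_on with
  | _ m ih =>
    intro acc
    rw [binRep]
    by_cases hm : m ≤ 1
    · rw [if_pos hm]
      interval_cases m <;> simp [Nat.digitChar] <;> ring
    · rw [if_neg hm]
      rw [List.foldl_append, ih (m / 2) (Nat.div_lt_self (by omega) (by norm_num))]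
      simp only [List.foldl_cons, List.foldl_nil, List.length_append, List.length_cons,
        List.length_nil]
      have h5 := Nat.mod_two_eq_zero_or_one m
      have h6 := Nat.div_add_mod m 2
      rcases h5 with h5 | h5 <;>
        simp [h5, Nat.digitChar, pow_succ] <;> push_cast <;>
        [skip; skip] <;> nlinarith [sq_nonneg (1:ℤ)]

theorem parseBin_toBin (x : Int) : parseBin (PySem.Int.toBin x).toList = x := by
  rw [PySem.Int.toList_toBin, PySem.Int.toBinChars]
  by_cases hx : x < 0
  · rw [if_pos hx]
    have hred : ∀ l : List Char, parseBin ('-' :: l) =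
        -(l.foldl (fun acc d => 2 * acc + (if d = '1' then 1 else 0)) 0) := fun l => rfl
    rw [hred, toDigits_two, binRep_foldl]
    simp only [zero_mul, zero_add]
    omega
  · rw [if_neg hx, toDigits_two]
    have hne : binRep x.toNat ≠ [] := binRep_ne_nil x.toNat
    obtain ⟨c, r, hcr⟩ := List.exists_cons_of_ne_nil hne
    have hc : c = '0' ∨ c = '1' :=
      binRep_mem x.toNat c (by rw [hcr]; exact List.mem_cons_self)
    rw [hcr, parseBin]
    have hcm : c ≠ '-' := by rcases hc with h | h <;> simp [h]
    rw [if_neg hcm, ← hcr, binRep_foldl]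
    simp
    omega

/-- per-element equality on a nonnegative value: A's string pipeline equals B's bit row -/
theorem elem_eq (w : Int) (x : Int) (hx : 0 ≤ x) :
    wallA (PySem.Str.zfill (PySem.Int.toBin x) w) = String.ofList (rowB x.toNat w) := by
  have hkey : (wallA (PySem.Str.zfill (PySem.Int.toBin x) w)).toList = rowB x.toNat w := by
    rw [wallA, PySem.Str.toList_replace, PySem.Str.toList_replace, PySem.Str.toList_zfill,
      PySem.Int.toList_toBin]
    have h1 : ("1" : String).toList = ['1'] := rfl
    have h0 : ("0" : String).toList = ['0'] := rfl
    have hh : ("#" : String).toList = ['#'] := rfl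
    have hs : (" " : String).toList = [' '] := rfl
    rw [h1, h0, hh, hs, wall_eq_map]
    rw [PySem.Int.toBinChars, if_neg (by omega), toDigits_two, zfill_wall]
  have := congrArg String.ofList hkey
  rwa [String.ofList_toList] at this

/-- Python's `|` on two nonnegative ints is nonnegative. -/
theorem lor_nonneg' (a b : Int) (ha : 0 ≤ a) (hb : 0 ≤ b) : 0 ≤ Int.lor a b := by
  obtain ⟨m, rfl⟩ := Int.eq_ofNat_of_zero_le ha
  obtain ⟨n, rfl⟩ := Int.eq_ofNat_of_zero_le hb
  exact Int.ofNat_nonneg (m ||| n)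

theorem foldl_wall (l : List String) : ∀ (acc : List String),
    l.foldl (fun answer binary => answer ++ [wallA binary]) acc = acc ++ l.map wallA := by
  induction l with
  | nil => simp
  | cons x t ih => intro acc; rw [List.foldl_cons, ih]; simp

theorem foldl_stepA (n : Int) (l : List (Int × Int)) :
    ∀ (s : List String × List String × List String),
    (l.foldl (stepA n) s).2.2 =
      s.2.2 ++ l.map (fun pr =>
        PySem.Str.zfill (PySem.Int.toBin
          (Int.lor (parseBin (PySem.Int.toBin pr.1).toList) (parseBin (PySem.Int.toBin pr.2).toList))) n) := by
  induction l with
  | nil => simp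
  | cons x t ih =>
    intro s
    rw [List.foldl_cons, ih]
    simp [stepA]

-- ===== VERDICT (by name: the statement is the Claim_ definition above) =====
theorem solution_spec : Claim_equal_solution := by
  intro n arr1 arr2 _ hpre
  unfold Spec_solution solution solution_alt
  rw [foldl_stepA, foldl_wall]
  simp only [List.nil_append, List.map_map]
  apply List.map_congr_left
  intro pr hpr
  unfold Pre_solution at hpre
  rw [List.all_eq_true] at hpre
  have h := hpre pr hpr
  simp only [Bool.and_eq_true, decide_eq_true_eq] at h
  have hlor : 0 ≤ Int.lor pr.1 pr.2 := lor_nonneg' pr.1 pr.2 h.1 h.2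
  simp only [Function.comp_apply, parseBin_toBin]
  exact elem_eq n (Int.lor pr.1 pr.2) hlor
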